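-- pv_equiv track=rewrite | github.com/orfeasa/advent-of-code-2022 | day_08/main.py | find_visible_in_line
-- ===== SOURCE A (Python) =====
-- def find_visible_in_line(
--     nums: list[list[int]], x_min, x_max, y_min, y_max: int
-- ) -> set[tuple[int, int]]:
--     if x_min != x_max and y_min != y_max:
--         raise ValueError(
--             "x_min and x_max must be equal or y_min and y_max must be equal"
--         )
--     visible = set()
--     current_max = -1
--     if x_min == x_max:
--         if y_min < y_max:
--             for y in range(y_min, y_max):
--                 if nums[y][x_min] > current_max:
--                     current_max = nums[y][x_min]
--                     visible.add((x_min, y))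
--         else:
--             for y in range(y_min-1, y_max-1, -1):
--                 if nums[y][x_min] > current_max:
--                     current_max = nums[y][x_min]
--                     visible.add((x_min, y))
--     else:
--         if x_min < x_max:
--             for x in range(x_min, x_max):
--                 if nums[y_min][x] > current_max:
--                     current_max = nums[y_min][x]
--                     visible.add((x, y_min))
--         else:
--             for x in range(x_min-1, x_max-1, -1):
--                 if nums[y_min][x] > current_max:
--                     current_max = nums[y_min][x]
--                     visible.add((x, y_min))
--     return visible
-- ===== SOURCE B (Python) =====
-- def find_visible_in_line(nums, x_min, x_max, y_min, y_max):
--     if x_min != x_max and y_min != y_max: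
--         raise ValueError(
--             "x_min and x_max must be equal or y_min and y_max must be equal"
--         )
--     # materialise the single line of coordinates, in scan order
--     if x_min == x_max:
--         rng = range(y_min, y_max) if y_min < y_max else range(y_min - 1, y_max - 1, -1)
--         pts = [(x_min, y) for y in rng]
--     else:
--         rng = range(x_min, x_max) if x_min < x_max else range(x_min - 1, x_max - 1, -1)
--         pts = [(x, y_min) for x in rng]
--     heights = [nums[y][x] for (x, y) in pts]
--     # prefix maxima of the heights strictly before each point
--     prefix = [-1]
--     for h in heights:
--         prefix.append(max(prefix[-1], h))
--     return {p for (p, h, m) in zip(pts, heights, prefix) if h > m}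
-- ===== Notes on version B (the rewrite author's own statement) =====
-- stated objective: simpler
-- what changed: The four duplicated running-max loops are replaced by materialising the line's coordinates once, computing the prefix maxima of their heights, and selecting with one comprehension the points whose height strictly exceeds the prefix max before them.
import Mathlib
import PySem

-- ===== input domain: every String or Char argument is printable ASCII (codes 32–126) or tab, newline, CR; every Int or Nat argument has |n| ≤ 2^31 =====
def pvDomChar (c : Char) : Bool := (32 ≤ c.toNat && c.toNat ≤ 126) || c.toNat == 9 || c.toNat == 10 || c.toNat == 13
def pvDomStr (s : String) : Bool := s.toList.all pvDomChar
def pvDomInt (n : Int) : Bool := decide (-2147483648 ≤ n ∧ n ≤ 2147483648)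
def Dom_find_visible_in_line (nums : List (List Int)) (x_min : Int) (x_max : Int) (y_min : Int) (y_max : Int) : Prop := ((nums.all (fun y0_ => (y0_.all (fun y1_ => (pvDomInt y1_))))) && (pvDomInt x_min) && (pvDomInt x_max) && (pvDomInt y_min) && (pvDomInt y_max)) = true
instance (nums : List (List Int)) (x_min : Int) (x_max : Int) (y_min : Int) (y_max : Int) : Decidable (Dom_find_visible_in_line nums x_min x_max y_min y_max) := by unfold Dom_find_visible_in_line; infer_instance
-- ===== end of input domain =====

-- B replaces A's four duplicated running-max loops by materialising the scan line once and
-- filtering against prefix maxima (objective: simpler); same result, same asymptotic cost.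


-- ===== PORT A =====
def find_visible_in_line (nums : List (List Int)) (x_min : Int) (x_max : Int) (y_min : Int) (y_max : Int) : List (Int × Int) :=
  if x_min ≠ x_max ∧ y_min ≠ y_max then []  -- Python raises ValueError here; excluded by Pre_
  else
    let step := fun (st : PySem.Set (Int × Int) × Int) (p : Int × Int) =>
      let h := PySem.List.pyGetD (PySem.List.pyGetD nums p.2 []) p.1 0
      if h > st.2 then (PySem.Set.add st.1 p, h) else st
    if x_min = x_max then
      if y_min < y_max then
        ((PySem.List.pyRange y_min y_max 1).foldl
          (fun st y => step st (x_min, y)) (PySem.Set.empty, -1)).1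
      else
        ((PySem.List.pyRange (y_min - 1) (y_max - 1) (-1)).foldl
          (fun st y => step st (x_min, y)) (PySem.Set.empty, -1)).1
    else
      if x_min < x_max then
        ((PySem.List.pyRange x_min x_max 1).foldl
          (fun st x => step st (x, y_min)) (PySem.Set.empty, -1)).1
      else
        ((PySem.List.pyRange (x_min - 1) (x_max - 1) (-1)).foldl
          (fun st x => step st (x, y_min)) (PySem.Set.empty, -1)).1

-- ===== PORT B =====
def find_visible_in_line_alt (nums : List (List Int)) (x_min : Int) (x_max : Int) (y_min : Int) (y_max : Int) : List (Int × Int) :=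
  if x_min ≠ x_max ∧ y_min ≠ y_max then []  -- Python raises ValueError here; excluded by Pre_
  else
    let pts : List (Int × Int) :=
      if x_min = x_max then
        (if y_min < y_max then PySem.List.pyRange y_min y_max 1
         else PySem.List.pyRange (y_min - 1) (y_max - 1) (-1)).map (fun y => (x_min, y))
      else
        (if x_min < x_max then PySem.List.pyRange x_min x_max 1
         else PySem.List.pyRange (x_min - 1) (x_max - 1) (-1)).map (fun x => (x, y_min))
    let heights := pts.map (fun p => PySem.List.pyGetD (PySem.List.pyGetD nums p.2 []) p.1 0)
    let prefixes := heights.foldl (fun acc h => acc ++ [max (PySem.List.pyGetD acc (-1) 0) h]) [-1]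
    PySem.Set.ofList (((pts.zip (heights.zip prefixes)).filter (fun q => q.2.1 > q.2.2)).map (fun q => q.1))

-- ===== PRECONDITION & SPEC =====
-- Pre_ excludes exactly the inputs where the Python A raises: the ValueError when both
-- x_min ≠ x_max and y_min ≠ y_max, and the IndexError when a scanned cell is out of range.
def Pre_find_visible_in_line (nums : List (List Int)) (x_min : Int) (x_max : Int) (y_min : Int) (y_max : Int) : Prop :=
  (x_min = x_max ∨ y_min = y_max) ∧
  (if x_min = x_max then
     ∀ y ∈ (if y_min < y_max then PySem.List.pyRange y_min y_max 1
            else PySem.List.pyRange (y_min - 1) (y_max - 1) (-1)),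
       PySem.Raise.InRange nums.length y ∧
       PySem.Raise.InRange (PySem.List.pyGetD nums y []).length x_min
   else
     ∀ x ∈ (if x_min < x_max then PySem.List.pyRange x_min x_max 1
            else PySem.List.pyRange (x_min - 1) (x_max - 1) (-1)),
       PySem.Raise.InRange nums.length y_min ∧
       PySem.Raise.InRange (PySem.List.pyGetD nums y_min []).length x)
instance (nums : List (List Int)) (x_min : Int) (x_max : Int) (y_min : Int) (y_max : Int) : Decidable (Pre_find_visible_in_line nums x_min x_max y_min y_max) := by unfold Pre_find_visible_in_line; infer_instance
def pvWitness_find_visible_in_line : List (List Int) × Int × Int × Int × Int := ([[1, 3], [2, 0]], 0, 0, 0, 2)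
def Spec_find_visible_in_line (nums : List (List Int)) (x_min : Int) (x_max : Int) (y_min : Int) (y_max : Int) (out : List (Int × Int)) : Prop := out = find_visible_in_line_alt nums x_min x_max y_min y_max
instance (nums : List (List Int)) (x_min : Int) (x_max : Int) (y_min : Int) (y_max : Int) (out : List (Int × Int)) : Decidable (Spec_find_visible_in_line nums x_min x_max y_min y_max out) := by unfold Spec_find_visible_in_line; infer_instance

-- ===== CLAIM (what is proved, stated in full; the proofs are below) =====
def Claim_equal_find_visible_in_line : Prop := ∀ (nums : List (List Int)) (x_min : Int) (x_max : Int) (y_min : Int) (y_max : Int), Dom_find_visible_in_line nums x_min x_max y_min y_max → Pre_find_visible_in_line nums x_min x_max y_min y_max → Spec_find_visible_in_line nums x_min x_max y_min y_max (find_visible_in_line nums x_min x_max y_min y_max)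

-- ===== LEMMAS AND PROOFS =====

-- visible points of a scan line, one structural pass with running max m
def pvVis (hgt : Int × Int → Int) : Int → List (Int × Int) → List (Int × Int)
  | _, [] => []
  | m, p :: t => if hgt p > m then p :: pvVis hgt (hgt p) t else pvVis hgt m t

-- recursive form of the prefix-maximum list
def pvPref : Int → List Int → List Int
  | m, [] => [m]
  | m, h :: t => m :: pvPref (max m h) t

lemma pvPref_foldl (hs : List Int) : ∀ (l : List Int) (m : Int),
    hs.foldl (fun acc h => acc ++ [max (PySem.List.pyGetD acc (-1) 0) h]) (l ++ [m])
      = l ++ pvPref m hs := by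
  induction hs with
  | nil => intro l m; simp [pvPref]
  | cons h t ih =>
    intro l m
    simp only [List.foldl_cons, PySem.List.pyGetD_neg_one_append_singleton]
    rw [ih (l ++ [m]) (max m h)]
    simp [pvPref]

lemma pvZip (hgt : Int × Int → Int) (pts : List (Int × Int)) : ∀ m : Int,
    (((pts.zip ((pts.map hgt).zip (pvPref m (pts.map hgt)))).filter
        (fun q => q.2.1 > q.2.2)).map (fun q => q.1)) = pvVis hgt m pts := by
  induction pts with
  | nil => intro m; simp [pvVis]
  | cons p t ih =>
    intro m
    simp only [List.map_cons, pvPref, List.zip_cons_cons, List.filter_cons]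
    by_cases hpm : hgt p > m
    · have : max m (hgt p) = hgt p := max_eq_right (le_of_lt hpm)
      simp [pvVis, hpm, this, ih]
    · have : max m (hgt p) = m := max_eq_left (by omega)
      simp [pvVis, hpm, this, ih]

lemma pvA (hgt : Int × Int → Int) (pts : List (Int × Int)) : ∀ (s : PySem.Set (Int × Int)) (m : Int),
    (pts.foldl (fun st p => if hgt p > st.2 then (PySem.Set.add st.1 p, hgt p) else st) (s, m)).1
      = (pvVis hgt m pts).foldl PySem.Set.add s := by
  induction pts with
  | nil => intro s m; simp [pvVis]
  | cons p t ih =>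
    intro s m
    by_cases hpm : hgt p > m
    · simp [pvVis, hpm, ih]
    · simp [pvVis, hpm, ih]

lemma pvMain (hgt : Int × Int → Int) (pts : List (Int × Int)) :
    (pts.foldl (fun st p => if hgt p > st.2 then (PySem.Set.add st.1 p, hgt p) else st)
        (PySem.Set.empty, -1)).1
      = PySem.Set.ofList (((pts.zip ((pts.map hgt).zip
          ((pts.map hgt).foldl (fun acc h => acc ++ [max (PySem.List.pyGetD acc (-1) 0) h]) [-1]))).filter
            (fun q => q.2.1 > q.2.2)).map (fun q => q.1)) := by
  have hp : ([-1] : List Int) = [] ++ [-1] := rfl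
  rw [hp, pvPref_foldl, List.nil_append, pvZip, pvA, PySem.Set.ofList_eq_foldl]
  rfl


-- ===== VERDICT (by name: the statement is the Claim_ definition above) =====
theorem find_visible_in_line_spec : Claim_equal_find_visible_in_line := by
  intro nums x_min x_max y_min y_max _ _
  unfold Spec_find_visible_in_line find_visible_in_line find_visible_in_line_alt
  by_cases hg : x_min ≠ x_max ∧ y_min ≠ y_max
  · simp [hg]
  · rw [if_neg hg, if_neg hg]
    dsimp only
    by_cases hx : x_min = x_max
    · rw [if_pos hx, if_pos hx]
      by_cases hy : y_min < y_max
      · rw [if_pos hy, if_pos hy]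
        have h1 := pvMain (fun p => PySem.List.pyGetD (PySem.List.pyGetD nums p.2 []) p.1 0)
          ((PySem.List.pyRange y_min y_max 1).map (fun y => ((x_min : Int), y)))
        rw [List.foldl_map] at h1
        exact h1
      · rw [if_neg hy, if_neg hy]
        have h1 := pvMain (fun p => PySem.List.pyGetD (PySem.List.pyGetD nums p.2 []) p.1 0)
          ((PySem.List.pyRange (y_min - 1) (y_max - 1) (-1)).map (fun y => ((x_min : Int), y)))
        rw [List.foldl_map] at h1
        exact h1
    · rw [if_neg hx, if_neg hx]
      by_cases hxl : x_min < x_max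
      · rw [if_pos hxl, if_pos hxl]
        have h1 := pvMain (fun p => PySem.List.pyGetD (PySem.List.pyGetD nums p.2 []) p.1 0)
          ((PySem.List.pyRange x_min x_max 1).map (fun x => (x, y_min)))
        rw [List.foldl_map] at h1
        exact h1
      · rw [if_neg hxl, if_neg hxl]
        have h1 := pvMain (fun p => PySem.List.pyGetD (PySem.List.pyGetD nums p.2 []) p.1 0)
          ((PySem.List.pyRange (x_min - 1) (x_max - 1) (-1)).map (fun x => (x, y_min)))
        rw [List.foldl_map] at h1
        exact h1
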